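-- pv_equiv track=rewrite | github.com/Purzelpu/AoC2019 | day15.py | hist2coord
-- ===== SOURCE A (Python) =====
-- def hist2coord(hist):
--     x = 0
--     y = 0
--     for m in hist:
--         if m == 1:
--             y = y +1
--         elif m == 2:
--             y = y -1
--         elif m == 3:
--             x = x -1
--         elif m==4:
--             x = x +1
--     return (x,y)
-- ===== SOURCE B (Python) =====
-- def hist2coord(hist):
--     c = {}
--     for m in hist:
--         c[m] = c.get(m, 0) + 1
--     return (c.get(4, 0) - c.get(3, 0), c.get(1, 0) - c.get(2, 0))
-- ===== Notes on version B (the rewrite author's own statement) =====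
-- stated objective: alternative
-- what changed: B tallies a frequency table of move codes in one pass and derives the coordinate by subtracting counts (x = count(4)-count(3), y = count(1)-count(2)) instead of incrementing x/y per move.
import Mathlib
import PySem

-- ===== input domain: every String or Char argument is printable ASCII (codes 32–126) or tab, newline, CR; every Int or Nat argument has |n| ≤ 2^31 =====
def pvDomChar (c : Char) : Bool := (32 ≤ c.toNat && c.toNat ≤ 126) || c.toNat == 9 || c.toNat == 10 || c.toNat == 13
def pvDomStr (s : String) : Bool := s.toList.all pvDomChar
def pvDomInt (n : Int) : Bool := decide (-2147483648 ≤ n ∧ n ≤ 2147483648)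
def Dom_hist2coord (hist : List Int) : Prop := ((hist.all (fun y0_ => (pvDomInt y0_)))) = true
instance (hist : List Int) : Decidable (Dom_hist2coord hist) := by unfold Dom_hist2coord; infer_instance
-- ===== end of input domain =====

-- B tallies move counts once and returns (count 4 - count 3, count 1 - count 2) instead of A's per-move coordinate updates; alternative decomposition, same cost.

-- ===== PORT A =====
def hist2coord (hist : List Int) : Int × Int :=
  let p := hist.foldl (fun (p : Int × Int) m =>
    if m == 1 then (p.1, p.2 + 1)
    else if m == 2 then (p.1, p.2 - 1)
    else if m == 3 then (p.1 - 1, p.2)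
    else if m == 4 then (p.1 + 1, p.2)
    else p) (0, 0)
  (p.1, p.2)

-- ===== PORT B =====
def hist2coord_alt (hist : List Int) : Int × Int :=
  let c := hist.foldl (fun (d : PySem.Dict Int Int) m => d.insert m (d.getD m 0 + 1)) PySem.Dict.empty
  (c.getD 4 0 - c.getD 3 0, c.getD 1 0 - c.getD 2 0)

-- ===== PRECONDITION & SPEC =====
def Spec_hist2coord (hist : List Int) (out : Int × Int) : Prop := out = hist2coord_alt hist
instance (hist : List Int) (out : Int × Int) : Decidable (Spec_hist2coord hist out) := by unfold Spec_hist2coord; infer_instance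

-- ===== CLAIM (what is proved, stated in full; the proofs are below) =====
def Claim_equal_hist2coord : Prop := ∀ (hist : List Int), Dom_hist2coord hist → Spec_hist2coord hist (hist2coord hist)

-- ===== LEMMAS AND PROOFS =====
lemma hist2coord_fold_eq (hist : List Int) (x y : Int) :
    hist.foldl (fun (p : Int × Int) m =>
      if m == 1 then (p.1, p.2 + 1)
      else if m == 2 then (p.1, p.2 - 1)
      else if m == 3 then (p.1 - 1, p.2)
      else if m == 4 then (p.1 + 1, p.2)
      else p) (x, y)
    = (x + hist.count 4 - hist.count 3, y + hist.count 1 - hist.count 2) := by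
  induction hist generalizing x y with
  | nil => simp
  | cons m t ih =>
    rw [List.foldl_cons]
    simp only [beq_iff_eq] at ih ⊢
    split_ifs with h1 h2 h3 h4
    · subst h1; rw [ih]; simp [Prod.mk.injEq]; omega
    · subst h2; rw [ih]; simp [Prod.mk.injEq]; omega
    · subst h3; rw [ih]; simp [Prod.mk.injEq]; omega
    · subst h4; rw [ih]; simp [Prod.mk.injEq]; omega
    · rw [ih]; simp [h1, h2, h3, h4]

-- ===== VERDICT (by name: the statement is the Claim_ definition above) =====
theorem hist2coord_spec : Claim_equal_hist2coord := by
  intro hist _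
  unfold Spec_hist2coord hist2coord hist2coord_alt
  simp only [hist2coord_fold_eq, PySem.Dict.getD_foldl_insert_add_one]
  simp [PySem.Dict.empty, PySem.Dict.getD, PySem.Dict.get?]
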